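-- pv_equiv track=rewrite | github.com/4dcu-be/DeckLock | plugins/fab/reader.py | build_stacks
-- ===== SOURCE A (Python) =====
-- def build_stacks(deck_data, stack_size=4):
--     output_stacks = []
--     current_stack = []
--
--     for ix, card in enumerate(deck_data["cards"]):
--         for _ in range(card["count"]):
--             current_stack.append(ix)
--             if len(current_stack) == stack_size:
--                 output_stacks.append(current_stack.copy())
--                 current_stack = []
--
--     output_stacks.append(current_stack.copy())
--     return output_stacks
-- ===== SOURCE B (Python) =====
-- def build_stacks(deck_data, stack_size=4):
--     flat = [ix for ix, card in enumerate(deck_data["cards"]) for _ in range(card["count"])]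
--     return [flat[i:i + stack_size] for i in range(0, len(flat) + 1, stack_size)]
-- ===== Notes on version B (the rewrite author's own statement) =====
-- stated objective: alternative
-- what changed: B materializes the flat list of repeated card indices in one comprehension and then cuts it into stacks by strided slicing (the len+1 bound reproduces the always-appended trailing stack), instead of A's interleaved append-and-reset accumulator loop; Pre_ restricts to the natural domain stack_size >= 1 (on nonpositive stack_size A's single-giant-stack output is an accident of its never-firing reset while B's strided range raises or yields no slices) and excludes inputs whose dicts lack the 'cards'/'count' keys, on which A raises KeyError.
-- outside the precondition, e.g. on build_stacks({'cards': [{'count': 2}]}, 0): A returns [[0, 0]], B raises ValueError; on build_stacks({'cards': [{'count': 2}]}, -1): A returns [[0, 0]], B returns []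
import Mathlib
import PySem

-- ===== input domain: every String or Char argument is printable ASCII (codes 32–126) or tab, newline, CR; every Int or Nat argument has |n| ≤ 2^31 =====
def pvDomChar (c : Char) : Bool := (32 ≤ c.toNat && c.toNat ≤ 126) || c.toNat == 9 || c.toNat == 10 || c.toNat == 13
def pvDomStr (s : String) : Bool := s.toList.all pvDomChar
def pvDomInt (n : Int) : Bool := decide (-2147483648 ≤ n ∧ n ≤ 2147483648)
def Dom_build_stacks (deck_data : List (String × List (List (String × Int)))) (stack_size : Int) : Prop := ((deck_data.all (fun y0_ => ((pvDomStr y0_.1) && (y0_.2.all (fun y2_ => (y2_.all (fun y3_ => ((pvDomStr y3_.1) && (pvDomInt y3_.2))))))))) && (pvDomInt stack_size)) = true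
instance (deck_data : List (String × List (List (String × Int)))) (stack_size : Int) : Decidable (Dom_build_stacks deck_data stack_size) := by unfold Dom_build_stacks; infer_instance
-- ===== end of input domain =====

-- B cuts the materialized flat index list into stacks by strided slicing instead of A's append-and-reset accumulator loop ("alternative", same cost).

-- ===== PORT A =====
def build_stacks (deck_data : List (String × List (List (String × Int)))) (stack_size : Int) : List (List Int) :=
  let st := (PySem.List.enumerate (PySem.Dict.getD ⟨deck_data⟩ "cards" [])).foldl
    (fun (s : List (List Int) × List Int) p =>
      (PySem.List.pyRange 0 (PySem.Dict.getD ⟨p.2⟩ "count" 0) 1).foldl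
        (fun (s : List (List Int) × List Int) _ =>
          let cur := s.2 ++ [p.1]
          if (cur.length : Int) = stack_size then (s.1 ++ [cur], []) else (s.1, cur)) s)
    ([], [])
  st.1 ++ [st.2]

-- ===== PORT B =====
def build_stacks_alt (deck_data : List (String × List (List (String × Int)))) (stack_size : Int) : List (List Int) :=
  let flat := (PySem.List.enumerate (PySem.Dict.getD ⟨deck_data⟩ "cards" [])).flatMap
    (fun p => (PySem.List.pyRange 0 (PySem.Dict.getD ⟨p.2⟩ "count" 0) 1).map (fun _ => p.1))
  (PySem.List.pyRange 0 ((flat.length : Int) + 1) stack_size).map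
    (fun i => PySem.List.slice flat (some i) (some (i + stack_size)))

-- ===== PRECONDITION & SPEC =====
-- Pre_ restricts to the natural domain stack_size ≥ 1 (on nonpositive stack_size A's single-giant-stack
-- output is an accident of its never-firing reset, while B's strided range raises or yields no slices)
-- and excludes inputs whose dicts lack the "cards"/"count" keys, on which the Python A raises KeyError.
def Pre_build_stacks (deck_data : List (String × List (List (String × Int)))) (stack_size : Int) : Prop :=
  1 ≤ stack_size ∧
  (PySem.Dict.get? (⟨deck_data⟩ : PySem.Dict String (List (List (String × Int)))) "cards").isSome = true ∧
  ∀ card ∈ PySem.Dict.getD (⟨deck_data⟩ : PySem.Dict String (List (List (String × Int)))) "cards" [],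
    (PySem.Dict.get? (⟨card⟩ : PySem.Dict String Int) "count").isSome = true
instance (deck_data : List (String × List (List (String × Int)))) (stack_size : Int) : Decidable (Pre_build_stacks deck_data stack_size) := by unfold Pre_build_stacks; infer_instance

def pvWitness_build_stacks : (List (String × List (List (String × Int)))) × Int :=
  ([("cards", [[("count", 2)], [("count", 3)]])], 4)

def Spec_build_stacks (deck_data : List (String × List (List (String × Int)))) (stack_size : Int) (out : List (List Int)) : Prop := out = build_stacks_alt deck_data stack_size
instance (deck_data : List (String × List (List (String × Int)))) (stack_size : Int) (out : List (List Int)) : Decidable (Spec_build_stacks deck_data stack_size out) := by unfold Spec_build_stacks; infer_instance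

-- ===== CLAIM (what is proved, stated in full; the proofs are below) =====
def Claim_equal_build_stacks : Prop := ∀ (deck_data : List (String × List (List (String × Int)))) (stack_size : Int), Dom_build_stacks deck_data stack_size → Pre_build_stacks deck_data stack_size → Spec_build_stacks deck_data stack_size (build_stacks deck_data stack_size)

-- ===== LEMMAS AND PROOFS =====

-- The step of A's accumulator loop, one flat index at a time.
def pvStep (k : Int) (s : List (List Int) × List Int) (x : Int) : List (List Int) × List Int :=
  if (((s.2 ++ [x]).length : Nat) : Int) = k then (s.1 ++ [s.2 ++ [x]], []) else (s.1, s.2 ++ [x])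

-- Reference chunking: stacks of size m+1, with the trailing (possibly empty) remainder stack.
def pvChunks (m : Nat) (l : List Int) : List (List Int) :=
  if h : l.length ≤ m then [l] else l.take (m+1) :: pvChunks m (l.drop (m+1))
termination_by l.length
decreasing_by simp; omega

lemma pvChunks_short {m : Nat} {l : List Int} (h : l.length ≤ m) : pvChunks m l = [l] := by
  rw [pvChunks]; simp [h]

lemma pvChunks_long {m : Nat} {l : List Int} (h : ¬ l.length ≤ m) :
    pvChunks m l = l.take (m+1) :: pvChunks m (l.drop (m+1)) := by
  rw [pvChunks]; simp [h]

-- A's loop computes the reference chunking.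
lemma pvFoldl_step_chunks (m : Nat) :
    ∀ (l : List Int) (out : List (List Int)) (cur : List Int), cur.length ≤ m →
      (l.foldl (pvStep ((m+1 : Nat) : Int)) (out, cur)).1 ++ [(l.foldl (pvStep ((m+1 : Nat) : Int)) (out, cur)).2]
        = out ++ pvChunks m (cur ++ l) := by
  intro l
  induction l with
  | nil =>
    intro out cur h
    simp [pvChunks_short h]
  | cons x l ih =>
    intro out cur h
    by_cases hc : cur.length = m
    · have hstep : pvStep ((m+1 : Nat) : Int) (out, cur) x = (out ++ [cur ++ [x]], []) := by
        simp [pvStep, hc]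
      have hlen : ¬ (cur ++ x :: l).length ≤ m := by
        simp only [List.length_append, List.length_cons]; omega
      rw [List.foldl_cons, hstep, ih (out ++ [cur ++ [x]]) [] (by simp), pvChunks_long hlen]
      have hsplit : cur ++ x :: l = (cur ++ [x]) ++ l := by simp
      have htake : (cur ++ x :: l).take (m+1) = cur ++ [x] := by
        rw [hsplit]; exact List.take_left' (by simp [hc])
      have hdrop : (cur ++ x :: l).drop (m+1) = l := by
        rw [hsplit]; exact List.drop_left' (by simp [hc])
      simp [htake, hdrop]
    · have hstep : pvStep ((m+1 : Nat) : Int) (out, cur) x = (out, cur ++ [x]) := by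
        simp [pvStep]; omega
      rw [List.foldl_cons, hstep, ih out (cur ++ [x]) (by simp; omega)]
      simp
  
-- B's strided slices compute the reference chunking.
lemma pvSlices_chunks_aux (m : Nat) :
    ∀ (n : Nat) (l : List Int), l.length ≤ n →
      (List.range (l.length / (m+1) + 1)).map (fun j => (l.drop ((m+1) * j)).take (m+1))
        = pvChunks m l := by
  intro n
  induction n with
  | zero =>
    intro l h
    have hl : l = [] := List.eq_nil_of_length_eq_zero (by omega)
    subst hl
    simp [pvChunks_short (by simp : ([] : List Int).length ≤ m)]
  | succ n ih =>
    intro l h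
    by_cases hshort : l.length ≤ m
    · have : l.length / (m+1) = 0 := Nat.div_eq_of_lt (by omega)
      simp [this, List.range_succ, pvChunks_short hshort, List.take_of_length_le (by omega : l.length ≤ m+1)]
    · have hlen : m + 1 ≤ l.length := by omega
      have hq : l.length / (m+1) = (l.length - (m+1)) / (m+1) + 1 :=
        Nat.div_eq_sub_div (by omega) hlen
      have hdroplen : (l.drop (m+1)).length = l.length - (m+1) := by simp
      rw [hq, List.range_succ_eq_map, List.map_cons, List.map_map]
      have hrest : (List.range ((l.length - (m+1)) / (m+1) + 1)).map
            ((fun j => (l.drop ((m+1) * j)).take (m+1)) ∘ Nat.succ)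
          = pvChunks m (l.drop (m+1)) := by
        rw [← ih (l.drop (m+1)) (by omega)]
        rw [hdroplen]
        apply List.map_congr_left
        intro j _
        simp [Function.comp, List.drop_drop]
        congr 1
        ring_nf
      rw [hrest, pvChunks_long hshort]
      simp

-- B's range-of-slices, in closed Nat form.
lemma pvRange_stride (m n : Nat) :
    PySem.List.pyRange 0 ((n : Int) + 1) ((m+1 : Nat) : Int)
      = (List.range (n / (m+1) + 1)).map (fun j => (((m+1) * j : Nat) : Int)) := by
  rw [PySem.List.pyRange_of_pos 0 ((n : Int) + 1) (by positivity)]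
  have hlt : (0 : Int) < (n : Int) + 1 := by positivity
  rw [if_pos hlt]
  have hcount : (((n : Int) + 1 - 0 + ((m+1 : Nat) : Int) - 1) / ((m+1 : Nat) : Int)).toNat
      = n / (m+1) + 1 := by
    have h1 : (n : Int) + 1 - 0 + ((m+1 : Nat) : Int) - 1 = ((n + (m+1) : Nat) : Int) := by push_cast; ring
    rw [h1, ← Int.natCast_div, Int.toNat_natCast, Nat.add_div_right _ (by omega)]
  rw [hcount]
  apply List.map_congr_left
  intro j _
  push_cast
  ring

theorem build_stacks_spec : Claim_equal_build_stacks := by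
  intro deck_data stack_size _ hpre
  obtain ⟨hk, -, -⟩ := hpre
  unfold Spec_build_stacks
  set cards := PySem.Dict.getD (⟨deck_data⟩ : PySem.Dict String (List (List (String × Int)))) "cards" [] with hcards
  set flat : List Int := (PySem.List.enumerate cards).flatMap
    (fun p => (PySem.List.pyRange 0 (PySem.Dict.getD ⟨p.2⟩ "count" 0) 1).map (fun _ => p.1)) with hflat
  obtain ⟨m, hm⟩ : ∃ m : Nat, stack_size = ((m+1 : Nat) : Int) := ⟨stack_size.toNat - 1, by omega⟩
  subst hm
  have hAdef : build_stacks deck_data ((m+1 : Nat) : Int)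
      = ((PySem.List.enumerate cards).foldl
          (fun (s : List (List Int) × List Int) p =>
            (PySem.List.pyRange 0 (PySem.Dict.getD ⟨p.2⟩ "count" 0) 1).foldl
              (fun (s : List (List Int) × List Int) _ =>
                let cur := s.2 ++ [p.1]
                if (cur.length : Int) = ((m+1 : Nat) : Int) then (s.1 ++ [cur], []) else (s.1, cur)) s)
          ([], [])).1 ++ [((PySem.List.enumerate cards).foldl
          (fun (s : List (List Int) × List Int) p =>
            (PySem.List.pyRange 0 (PySem.Dict.getD ⟨p.2⟩ "count" 0) 1).foldl
              (fun (s : List (List Int) × List Int) _ =>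
                let cur := s.2 ++ [p.1]
                if (cur.length : Int) = ((m+1 : Nat) : Int) then (s.1 ++ [cur], []) else (s.1, cur)) s)
          ([], [])).2] := rfl
  have hBdef : build_stacks_alt deck_data ((m+1 : Nat) : Int)
      = (PySem.List.pyRange 0 ((flat.length : Int) + 1) ((m+1 : Nat) : Int)).map
          (fun i => PySem.List.slice flat (some i) (some (i + ((m+1 : Nat) : Int)))) := rfl
  rw [hAdef, hBdef]
  -- A's nested folds are the flat fold of pvStep
  have hA : (PySem.List.enumerate cards).foldl
      (fun (s : List (List Int) × List Int) p =>
        (PySem.List.pyRange 0 (PySem.Dict.getD ⟨p.2⟩ "count" 0) 1).foldl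
          (fun (s : List (List Int) × List Int) _ =>
            let cur := s.2 ++ [p.1]
            if (cur.length : Int) = ((m+1 : Nat) : Int) then (s.1 ++ [cur], []) else (s.1, cur)) s)
      ([], [])
      = flat.foldl (pvStep ((m+1 : Nat) : Int)) ([], []) := by
    rw [hflat, List.foldl_flatMap]
    apply PySem.List.foldl_congr_mem
    intro s p _
    rw [List.foldl_map]
    apply PySem.List.foldl_congr_mem
    intro s' y _
    simp [pvStep]
  rw [hA]
  have hmain := pvFoldl_step_chunks m flat [] [] (by simp)
  simp only [List.nil_append] at hmain
  rw [hmain]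
  rw [pvRange_stride m flat.length, List.map_map]
  rw [← pvSlices_chunks_aux m flat.length flat le_rfl]
  apply List.map_congr_left
  intro j _
  simp only [Function.comp_apply]
  have h := PySem.List.slice_natCast_add flat ((m+1)*j) (m+1)
  push_cast at h ⊢
  rw [h]
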